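-- pv_equiv track=rewrite | github.com/sebbele/advent-of-code-2018 | 4-1.py | findBiggestSleeper
-- ===== SOURCE A (Python) =====
-- def findBiggestSleeper(guard_info):
--     guards_sleep_time = {}
--     for guard_id in guard_info:
--         sleep_time = 0
--         for date in guard_info[guard_id]:
--             sleep_time += len(guard_info[guard_id][date])
--         guards_sleep_time[guard_id] = sleep_time
--     biggest_sleeper = max(guards_sleep_time, key=lambda i: guards_sleep_time[i])
--     return biggest_sleeper
-- ===== SOURCE B (Python) =====
-- def findBiggestSleeper(guard_info):
--     best_id = None
--     best_total = -1
--     for guard_id, dates in guard_info.items():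
--         total = sum(len(minutes) for minutes in dates.values())
--         if total > best_total:
--             best_id = guard_id
--             best_total = total
--     if best_id is None:
--         raise ValueError("max() arg is an empty sequence")
--     return best_id
-- ===== Notes on version B (the rewrite author's own statement) =====
-- stated objective: simpler
-- what changed: Replaces A's two-phase 'build a totals dict, then max(dict, key=lookup)' with a single fused pass over the items that tracks the best guard and its total directly (strict > keeps the first-seen guard on ties, like dict-order max).
import Mathlib
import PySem

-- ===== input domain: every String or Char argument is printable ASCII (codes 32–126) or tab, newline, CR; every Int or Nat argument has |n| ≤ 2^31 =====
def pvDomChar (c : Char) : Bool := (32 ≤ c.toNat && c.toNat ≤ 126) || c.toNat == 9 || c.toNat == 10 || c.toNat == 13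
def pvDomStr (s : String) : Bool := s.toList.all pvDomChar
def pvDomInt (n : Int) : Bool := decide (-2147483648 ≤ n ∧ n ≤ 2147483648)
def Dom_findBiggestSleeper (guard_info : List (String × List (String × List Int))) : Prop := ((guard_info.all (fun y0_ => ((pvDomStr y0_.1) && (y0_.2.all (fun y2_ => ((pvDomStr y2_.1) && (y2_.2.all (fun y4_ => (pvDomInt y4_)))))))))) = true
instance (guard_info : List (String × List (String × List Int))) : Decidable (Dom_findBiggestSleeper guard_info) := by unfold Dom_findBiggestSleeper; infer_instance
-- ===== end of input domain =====

-- B fuses A's two phases (totals dict, then max over it) into one pass tracking the best guard;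
-- objective: simpler. Equivalence is about the return value on non-empty dicts.

-- ===== PORT A =====
-- literal port of A: build guards_sleep_time by iterating the keys and looking the values
-- up in the dict, then max(dict, key=lambda i: dict[i]); max's none on an empty dict is
-- Python's ValueError, excluded by Pre_ (the .getD "" is never reached inside Pre_).
-- A's inner loop: sleep_time accumulated over the dates of one guard (dict lookups, first match)
def pvSleepOf (d : PySem.Dict String (List (String × List Int))) (guard_id : String) : Int :=
  let dates : PySem.Dict String (List Int) := PySem.Dict.mk (d.getD guard_id [])
  dates.keys.foldl (fun s date => s + ((dates.getD date []).length : Int)) 0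

def findBiggestSleeper (guard_info : List (String × List (String × List Int))) : String :=
  let d : PySem.Dict String (List (String × List Int)) := PySem.Dict.mk guard_info
  let guards_sleep_time : PySem.Dict String Int :=
    d.keys.foldl (fun acc guard_id => acc.insert guard_id (pvSleepOf d guard_id)) PySem.Dict.empty
  (PySem.List.max? guards_sleep_time.keys (fun i => guards_sleep_time.getD i 0)).getD ""

-- ===== PORT B =====
-- port of Source B: one fold over the items keeping (best_id, best_total); none at the end is
-- Source B's ValueError on the empty dict, excluded by Pre_.
def findBiggestSleeper_alt (guard_info : List (String × List (String × List Int))) : String :=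
  let r : Option String × Int :=
    guard_info.foldl (fun acc p =>
      let total : Int := p.2.foldl (fun s q => s + (q.2.length : Int)) 0
      if total > acc.2 then (some p.1, total) else acc) (none, -1)
  r.1.getD ""

-- ===== PRECONDITION & SPEC =====
-- Pre_ excludes the empty dict, on which A's max() raises ValueError (B raises it too), and
-- association lists with duplicate keys (outer or inner), which do not represent a Python dict.
def Pre_findBiggestSleeper (guard_info : List (String × List (String × List Int))) : Prop :=
  guard_info ≠ [] ∧ (guard_info.map Prod.fst).Nodup ∧
    ∀ p ∈ guard_info, (p.2.map Prod.fst).Nodup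
instance (guard_info : List (String × List (String × List Int))) : Decidable (Pre_findBiggestSleeper guard_info) := by unfold Pre_findBiggestSleeper; infer_instance

def pvWitness_findBiggestSleeper : (List (String × List (String × List Int))) :=
  [("10", [("11-01", [5, 6]), ("11-03", [24])]), ("99", [("11-02", [40, 41, 42])])]

def Spec_findBiggestSleeper (guard_info : List (String × List (String × List Int))) (out : String) : Prop := out = findBiggestSleeper_alt guard_info
instance (guard_info : List (String × List (String × List Int))) (out : String) : Decidable (Spec_findBiggestSleeper guard_info out) := by unfold Spec_findBiggestSleeper; infer_instance

-- ===== CLAIM (what is proved, stated in full; the proofs are below) =====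
def Claim_equal_findBiggestSleeper : Prop := ∀ (guard_info : List (String × List (String × List Int))), Dom_findBiggestSleeper guard_info → Pre_findBiggestSleeper guard_info → Spec_findBiggestSleeper guard_info (findBiggestSleeper guard_info)

-- ===== LEMMAS AND PROOFS =====

-- the total sleep of one guard, as B computes it
def pvT (p : String × List (String × List Int)) : Int :=
  p.2.foldl (fun s q => s + (q.2.length : Int)) 0

lemma pvT_init_le (v : List (String × List Int)) :
    ∀ s : Int, s ≤ v.foldl (fun s q => s + (q.2.length : Int)) s := by
  induction v with
  | nil => intro s; simp
  | cons q t ih =>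
      intro s
      calc s ≤ s + (q.2.length : Int) := by omega
        _ ≤ _ := ih _

lemma pvT_nonneg (p : String × List (String × List Int)) : 0 ≤ pvT p :=
  pvT_init_le p.2 0

-- A's inner loop (dict keys + lookups) computes B's direct sum, given unique date keys
lemma pv_inner (v : List (String × List Int)) (h : (v.map Prod.fst).Nodup) :
    (PySem.Dict.mk v).keys.foldl
        (fun s date => s + (((PySem.Dict.mk v).getD date []).length : Int)) 0
      = v.foldl (fun s q => s + (q.2.length : Int)) 0 := by
  rw [PySem.Dict.keys_mk, List.foldl_map]
  refine PySem.List.foldl_congr_mem v _ _ 0 ?_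
  intro acc q hq
  have hk : (PySem.Dict.mk v).keys.Nodup := by rw [PySem.Dict.keys_mk]; exact h
  have := PySem.Dict.getD_of_mem_items (PySem.Dict.mk v) (k := q.1) (v := q.2)
    (by exact hq) hk []
  rw [this]

-- max?'s fold step, named so the proofs can manipulate it
def pvAstep (K : String → Int) (acc : Option String) (x : String) : Option String :=
  match acc with
  | none => some x
  | some m => if K m < K x then some x else some m

lemma pv_max?_eq_foldl (xs : List String) (K : String → Int) :
    PySem.List.max? xs K = xs.foldl (pvAstep K) none := by
  simp only [PySem.List.max?]
  exact PySem.List.foldl_congr_mem xs _ _ none (fun acc x _ => by cases acc <;> rfl)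

-- the shared max loop: A's option-valued first-max fold over the keys equals
-- B's (best, total) fold, once every key's looked-up total agrees with pvT
lemma pv_loop (K : String → Int) (l : List (String × List (String × List Int))) :
    (∀ p ∈ l, K p.1 = pvT p) → ∀ m : String,
    ∃ m', l.foldl (fun acc p => pvAstep K acc p.1) (some m) = some m'
      ∧ l.foldl (fun acc p => if pvT p > acc.2 then (some p.1, pvT p) else acc)
            ((some m : Option String), K m) = (some m', K m') := by
  induction l with
  | nil => intro _ m; exact ⟨m, rfl, rfl⟩
  | cons p t ih =>
      intro hKT m
      have hp : K p.1 = pvT p := hKT p (List.mem_cons_self ..)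
      have ht : ∀ q ∈ t, K q.1 = pvT q := fun q hq => hKT q (List.mem_cons_of_mem _ hq)
      simp only [List.foldl_cons, pvAstep]
      by_cases h : K m < K p.1
      · have h' : pvT p > K m := by rw [← hp]; exact h
        rw [if_pos h, if_pos h', ← hp]
        exact ih ht p.1
      · have h' : ¬ pvT p > K m := by rw [← hp]; exact h
        rw [if_neg h, if_neg h']
        exact ih ht m
  
-- ===== VERDICT (by name: the statement is the Claim_ definition above) =====
theorem findBiggestSleeper_spec : Claim_equal_findBiggestSleeper := by
  intro guard_info _ hpre
  obtain ⟨hne, hnodup, hinner⟩ := hpre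
  unfold Spec_findBiggestSleeper findBiggestSleeper findBiggestSleeper_alt
  set D : PySem.Dict String (List (String × List Int)) := PySem.Dict.mk guard_info with hDdef
  set GST : PySem.Dict String Int :=
    D.keys.foldl (fun acc guard_id => acc.insert guard_id (pvSleepOf D guard_id)) PySem.Dict.empty
    with hGSTdef
  show (PySem.List.max? GST.keys (fun i => GST.getD i 0)).getD "" =
    (guard_info.foldl (fun acc p => if pvT p > acc.2 then (some p.1, pvT p) else acc)
      ((none : Option String), (-1 : Int))).1.getD ""
  have hkeysD : D.keys = guard_info.map Prod.fst := PySem.Dict.keys_mk _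
  have hitems : GST.items = (guard_info.map Prod.fst).map (fun gid => (gid, pvSleepOf D gid)) := by
    rw [hGSTdef, hkeysD]
    have := PySem.Dict.items_foldl_insert_fresh (guard_info.map Prod.fst)
      (fun a => a) (fun a => pvSleepOf D a) PySem.Dict.empty
      (fun a _ => by simp [PySem.Dict.contains_empty]) (by simpa using hnodup)
    simpa using this
  have hkeysGST : GST.keys = guard_info.map Prod.fst := by
    simp [PySem.Dict.keys, hitems, Function.comp]
  have hnodupGST : GST.keys.Nodup := by rw [hkeysGST]; exact hnodup
  have hK : ∀ p ∈ guard_info, GST.getD p.1 0 = pvT p := by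
    intro p hp
    have h1 : (p.1, pvSleepOf D p.1) ∈ GST.items := by
      rw [hitems]
      exact List.mem_map_of_mem (List.mem_map_of_mem hp)
    rw [PySem.Dict.getD_of_mem_items GST h1 hnodupGST 0]
    have hDget : D.getD p.1 [] = p.2 := by
      have hmem : (p.1, p.2) ∈ D.items := by simpa [hDdef] using hp
      exact PySem.Dict.getD_of_mem_items D hmem (by rw [hkeysD]; exact hnodup) []
    unfold pvSleepOf
    rw [hDget]
    exact pv_inner p.2 (hinner p hp)
  rw [hkeysGST, pv_max?_eq_foldl]
  simp only [List.foldl_map]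
  rcases guard_info with _ | ⟨p, t⟩
  · exact absurd rfl hne
  · have hKp : GST.getD p.1 0 = pvT p := hK p (List.mem_cons_self ..)
    have hKt : ∀ q ∈ t, GST.getD q.1 0 = pvT q :=
      fun q hq => hK q (List.mem_cons_of_mem _ hq)
    obtain ⟨m', hA, hB⟩ := pv_loop (fun i => GST.getD i 0) t hKt p.1
    simp only [List.foldl_cons]
    rw [show pvAstep (fun i => GST.getD i 0) none p.1 = some p.1 from rfl]
    have hpos : pvT p > ((none : Option String), (-1 : Int)).2 := by
      have := pvT_nonneg p; simp; omega
    rw [show (if pvT p > ((none : Option String), (-1 : Int)).2 then (some p.1, pvT p)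
          else ((none : Option String), (-1 : Int))) = (some p.1, pvT p) from if_pos hpos]
    rw [← hKp, hB, hA]
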